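-- pv_equiv track=rewrite | github.com/jdolivet/Programmation | Python/Bioinformatique/1-ADN et Sequences/promenadeADN.py | path_x_y
-- ===== SOURCE A (Python) =====
-- def path_x_y(adn):
--     """
--     algorithme qui calcule les deux chemins en x et y
--     en partant et en se deplaçant le long de la chaine
--     """
--     # dictionnaire pour associer un deplacement a chaque nucleotide
--     moves = {'C': [1, 0], 'A': [0, 1], 'G': [-1, 0], 'T': [0, -1]}
--     # initialise les résultats
--     path_x, path_y = [], []
--     # on commence au centre
--     x, y = 0, 0
--     # le point de départ fait partie du chemin
--     path_x.append(x)
--     path_y.append(y)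
--
--     # pour tout l'ADN
--     for nucleotide in adn:
--         # quel deplacement faut-il faire
--         delta_x, delta_y = moves[nucleotide]
--         # on l'applique
--         x += delta_x
--         y += delta_y
--         # on range le point courant
--         # dans les listes resultat
--         path_x.append(x)
--         path_y.append(y)
--     return path_x, path_y
-- ===== SOURCE B (Python) =====
-- def path_x_y(adn):
--     """Divide-and-conquer: the path of a string is the path of its left half
--     followed by the path of its right half translated by the left endpoint."""
--     moves = {'C': (1, 0), 'A': (0, 1), 'G': (-1, 0), 'T': (0, -1)}
--
--     def walk(s):
--         if len(s) == 0:
--             return [0], [0]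
--         if len(s) == 1:
--             dx, dy = moves[s]
--             return [0, dx], [0, dy]
--         m = len(s) // 2
--         lx, ly = walk(s[:m])
--         rx, ry = walk(s[m:])
--         ex, ey = lx[-1], ly[-1]
--         return lx + [ex + p for p in rx[1:]], ly + [ey + p for p in ry[1:]]
--
--     return walk(adn)
-- ===== Notes on version B (the rewrite author's own statement) =====
-- stated objective: alternative
-- what changed: Replaces the single left-to-right running-coordinate loop with a divide-and-conquer recursion: split the string in half, compute each half's path independently, and translate the right half's path by the left half's endpoint before concatenating.
import Mathlib
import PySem

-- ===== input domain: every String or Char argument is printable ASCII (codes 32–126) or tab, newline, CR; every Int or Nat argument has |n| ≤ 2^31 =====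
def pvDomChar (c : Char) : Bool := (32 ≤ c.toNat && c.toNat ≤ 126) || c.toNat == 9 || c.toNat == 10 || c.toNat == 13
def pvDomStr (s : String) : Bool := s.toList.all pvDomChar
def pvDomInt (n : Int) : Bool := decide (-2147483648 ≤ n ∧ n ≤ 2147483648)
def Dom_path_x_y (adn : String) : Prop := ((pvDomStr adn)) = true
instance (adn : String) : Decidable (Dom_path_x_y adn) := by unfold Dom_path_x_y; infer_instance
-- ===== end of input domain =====

-- B replaces A's single running-coordinate loop by a divide-and-conquer recursion (halve, solve, translate, concatenate); same result, different algorithm.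

-- the moves dictionary, the same literal in both programs
def pvMoves : PySem.Dict Char (Int × Int) :=
  PySem.Dict.ofList [('C', (1, 0)), ('A', (0, 1)), ('G', (-1, 0)), ('T', (0, -1))]

-- ===== PORT A =====
-- moves[nucleotide]: Python raises KeyError on chars outside 'CAGT'; Pre_ excludes those, the (0,0) default is unreachable under Pre_
def path_x_y (adn : String) : List Int × List Int :=
  let st := adn.toList.foldl
    (fun (s : List Int × List Int × Int × Int) nucleotide =>
      let (path_x, path_y, x, y) := s
      let (delta_x, delta_y) := (pvMoves.get? nucleotide).getD (0, 0)
      (path_x ++ [x + delta_x], path_y ++ [y + delta_y], x + delta_x, y + delta_y))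
    ([0], [0], 0, 0)
  (st.1, st.2.1)

-- ===== PORT B =====
-- walk(s): divide and conquer over the character list; lx[-1]/ly[-1] are on
-- always-nonempty lists ([0]-prefixed), ported as getLastD 0 (exact there)
def pvWalk (s : List Char) : List Int × List Int :=
  match s with
  | [] => ([0], [0])
  | [c] =>
    let (dx, dy) := (pvMoves.get? c).getD (0, 0)
    ([0, dx], [0, dy])
  | c₁ :: c₂ :: rest =>
    let s := c₁ :: c₂ :: rest
    let m := s.length / 2
    let lp := pvWalk (s.take m)
    let rp := pvWalk (s.drop m)
    let ex := lp.1.getLastD 0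
    let ey := lp.2.getLastD 0
    (lp.1 ++ (rp.1.drop 1).map (fun p => ex + p),
     lp.2 ++ (rp.2.drop 1).map (fun p => ey + p))
termination_by s.length
decreasing_by
  · simp; omega
  · simp; omega

def path_x_y_alt (adn : String) : List Int × List Int := pvWalk adn.toList

-- ===== PRECONDITION & SPEC =====
-- Pre_ excludes exactly the strings with a character outside 'CAGT', on which both Pythons raise KeyError.
def Pre_path_x_y (adn : String) : Prop :=
  (adn.toList.all (fun c => c == 'C' || c == 'A' || c == 'G' || c == 'T')) = true
instance (adn : String) : Decidable (Pre_path_x_y adn) := by unfold Pre_path_x_y; infer_instance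
def pvWitness_path_x_y : String := "CAGT"

def Spec_path_x_y (adn : String) (out : List Int × List Int) : Prop := out = path_x_y_alt adn
instance (adn : String) (out : List Int × List Int) : Decidable (Spec_path_x_y adn out) := by unfold Spec_path_x_y; infer_instance

-- ===== CLAIM (what is proved, stated in full; the proofs are below) =====
def Claim_equal_path_x_y : Prop := ∀ (adn : String), Dom_path_x_y adn → Pre_path_x_y adn → Spec_path_x_y adn (path_x_y adn)

-- ===== LEMMAS AND PROOFS =====

-- both programs compute x :: pvScan x deltas on each axis
def pvScan (x : Int) : List Int → List Int
  | [] => []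
  | d :: ds => (x + d) :: pvScan (x + d) ds

def pvDX (c : Char) : Int := ((pvMoves.get? c).getD (0, 0)).1
def pvDY (c : Char) : Int := ((pvMoves.get? c).getD (0, 0)).2

theorem pvScan_shift (a : Int) : ∀ (x : Int) (ds : List Int),
    pvScan (a + x) ds = (pvScan x ds).map (fun p => a + p) := by
  intro x ds
  induction ds generalizing x with
  | nil => simp [pvScan]
  | cons d ds ih => simp [pvScan, add_assoc, ih]

theorem pvScan_append (ds₁ ds₂ : List Int) : ∀ (x : Int),
    pvScan x (ds₁ ++ ds₂) = pvScan x ds₁ ++ pvScan (x + ds₁.sum) ds₂ := by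
  induction ds₁ with
  | nil => simp [pvScan]
  | cons d ds ih => intro x; simp [pvScan, ih, add_assoc]

theorem pvScan_getLastD (ds : List Int) : ∀ (x : Int),
    (x :: pvScan x ds).getLastD 0 = x + ds.sum := by
  induction ds with
  | nil => simp [pvScan]
  | cons d ds ih =>
    intro x
    have := ih (x + d)
    simp [pvScan] at this ⊢
    omega

-- gluing two prefix-scan paths: translate the second by the first's endpoint
theorem pvScan_glue (ds₁ ds₂ : List Int) :
    (0 :: pvScan 0 ds₁) ++ (pvScan 0 ds₂).map (fun p => (0 :: pvScan 0 ds₁).getLastD 0 + p)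
      = 0 :: pvScan 0 (ds₁ ++ ds₂) := by
  have h := pvScan_shift ds₁.sum 0 ds₂
  rw [add_zero] at h
  rw [pvScan_getLastD, pvScan_append, zero_add, ← h]
  simp

-- B's divide and conquer produces the full prefix-scan path on each axis
theorem pvWalk_eq (s : List Char) :
    pvWalk s = (0 :: pvScan 0 (s.map pvDX), 0 :: pvScan 0 (s.map pvDY)) := by
  induction s using pvWalk.induct with
  | case1 => simp [pvWalk, pvScan]
  | case2 c dx dy h => simp [pvWalk, pvScan, pvDX, pvDY, h]
  | case3 c₁ c₂ rest s m ih₁ ih₂ =>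
    rw [pvWalk, ih₁, ih₂]
    refine Prod.ext ?_ ?_ <;>
      simp only [List.drop_one, List.tail_cons]
    · rw [pvScan_glue, ← List.map_append, List.take_append_drop]
    · rw [pvScan_glue, ← List.map_append, List.take_append_drop]

-- A's loop: both path components are prefix-scans of the per-axis deltas
theorem pvA_loop (cs : List Char) : ∀ (px py : List Int) (x y : Int),
    cs.foldl
      (fun (s : List Int × List Int × Int × Int) nucleotide =>
        let (path_x, path_y, x, y) := s
        let (delta_x, delta_y) := (pvMoves.get? nucleotide).getD (0, 0)
        (path_x ++ [x + delta_x], path_y ++ [y + delta_y], x + delta_x, y + delta_y))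
      (px, py, x, y)
      = (px ++ pvScan x (cs.map pvDX),
         py ++ pvScan y (cs.map pvDY),
         x + (cs.map pvDX).sum,
         y + (cs.map pvDY).sum) := by
  induction cs with
  | nil => intro px py x y; simp [pvScan]
  | cons c cs ih =>
    intro px py x y
    simp only [List.foldl_cons, ih, pvScan, List.map_cons, List.sum_cons,
      List.append_assoc, List.cons_append, List.nil_append, pvDX, pvDY]
    ring_nf

-- ===== VERDICT (by name: the statement is the Claim_ definition above) =====
theorem path_x_y_spec : Claim_equal_path_x_y := by
  intro adn _ _
  show path_x_y adn = path_x_y_alt adn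
  unfold path_x_y path_x_y_alt
  rw [pvA_loop, pvWalk_eq]
  simp
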